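-- pv_equiv track=rewrite | github.com/MajoorWaldi/ComfyUI-Majoor-AssetsManager | mjr_am_backend/features/geninfo/parser_impl.py | _looks_like_prompt_string
-- ===== SOURCE A (Python) =====
-- from typing import Any, cast
--
-- def _is_numeric_like_text(value: str) -> bool:
--     return all(ch.isdigit() or ch.isspace() or ch in ".,+-" for ch in value)
--
-- def _has_control_chars(value: str) -> bool:
--     return any(ord(ch) < 9 for ch in value)
--
-- def _looks_like_prompt_string(value: Any) -> bool:
--     """
--     Conservative heuristic: accept human-ish prompt strings; reject numbers/gibberish.
--     """
--     if not isinstance(value, str):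
--         return False
--     s = value.strip()
--     if not s or len(s) < 6:
--         return False
--     if _is_numeric_like_text(s):
--         return False
--     if _has_control_chars(s):
--         return False
--     return any(ch.isalpha() for ch in s)
-- ===== SOURCE B (Python) =====
-- def _looks_like_prompt_string(value) -> bool:
--     if not isinstance(value, str):
--         return False
--     s = value.strip()
--     if len(s) < 6:
--         return False
--     all_numeric_like = True
--     has_control = False
--     has_alpha = False
--     for ch in s:
--         if not (ch.isdigit() or ch.isspace() or ch in ".,+-"):
--             all_numeric_like = False
--         if ord(ch) < 9:
--             has_control = True
--         if ch.isalpha():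
--             has_alpha = True
--     return (not all_numeric_like) and (not has_control) and has_alpha
-- ===== Notes on version B (the rewrite author's own statement) =====
-- stated objective: simpler
-- what changed: Replaced the three helper-based scans (all-numeric-like, control-char, any-alpha) with one fused loop over the stripped string maintaining three flags, combined at the end; the empty-string guard is folded into len < 6.
import Mathlib
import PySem

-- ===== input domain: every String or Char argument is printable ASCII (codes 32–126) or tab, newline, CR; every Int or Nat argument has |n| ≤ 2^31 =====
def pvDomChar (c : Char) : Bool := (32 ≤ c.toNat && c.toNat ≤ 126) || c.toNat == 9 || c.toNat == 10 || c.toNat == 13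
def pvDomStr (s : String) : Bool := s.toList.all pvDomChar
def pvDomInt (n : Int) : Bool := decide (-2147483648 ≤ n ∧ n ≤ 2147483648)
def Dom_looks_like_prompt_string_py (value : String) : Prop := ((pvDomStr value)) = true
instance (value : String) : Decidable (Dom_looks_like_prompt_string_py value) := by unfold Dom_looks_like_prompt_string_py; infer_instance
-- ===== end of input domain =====

-- B fuses A's three separate scans into one loop carrying three flags; same guards, same character tests (simpler decomposition, same cost).


-- ===== PORT A =====
-- _is_numeric_like_text: all(ch.isdigit() or ch.isspace() or ch in ".,+-" for ch in value)
def pvIsNumericLikeText (cs : List Char) : Bool :=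
  cs.all (fun ch => PySem.Chars.isdigit ch || PySem.Chars.isspace ch || decide (ch ∈ ['.', ',', '+', '-']))

-- _has_control_chars: any(ord(ch) < 9 for ch in value)
def pvHasControlChars (cs : List Char) : Bool :=
  cs.any (fun ch => decide (ch.toNat < 9))

def looks_like_prompt_string_py (value : String) : Bool :=
  -- isinstance(value, str) is always true under the type convention
  let s := PySem.Chars.strip value.toList
  if s.isEmpty || decide (s.length < 6) then false
  else if pvIsNumericLikeText s then false
  else if pvHasControlChars s then false
  else s.any (fun ch => PySem.Chars.isalpha ch)

-- ===== PORT B =====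
def looks_like_prompt_string_py_alt (value : String) : Bool :=
  let s := PySem.Chars.strip value.toList
  if decide (s.length < 6) then false
  else
    let st := s.foldl (fun (st : Bool × Bool × Bool) ch =>
      ( st.1 && (PySem.Chars.isdigit ch || PySem.Chars.isspace ch || decide (ch ∈ ['.', ',', '+', '-']))
      , st.2.1 || decide (ch.toNat < 9)
      , st.2.2 || PySem.Chars.isalpha ch )) (true, false, false)
    !st.1 && !st.2.1 && st.2.2

-- ===== PRECONDITION & SPEC =====
def Spec_looks_like_prompt_string_py (value : String) (out : Bool) : Prop := out = looks_like_prompt_string_py_alt value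
instance (value : String) (out : Bool) : Decidable (Spec_looks_like_prompt_string_py value out) := by unfold Spec_looks_like_prompt_string_py; infer_instance

-- ===== CLAIM (what is proved, stated in full; the proofs are below) =====
def Claim_equal_looks_like_prompt_string_py : Prop := ∀ (value : String), Dom_looks_like_prompt_string_py value → Spec_looks_like_prompt_string_py value (looks_like_prompt_string_py value)

-- ===== LEMMAS AND PROOFS =====
-- B's fused fold computes exactly the three aggregates A computes in separate scans.
theorem pvFoldFlags (cs : List Char) (a b c : Bool) :
    cs.foldl (fun (st : Bool × Bool × Bool) ch =>
      ( st.1 && (PySem.Chars.isdigit ch || PySem.Chars.isspace ch || decide (ch ∈ ['.', ',', '+', '-']))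
      , st.2.1 || decide (ch.toNat < 9)
      , st.2.2 || PySem.Chars.isalpha ch )) (a, b, c)
    = ( a && cs.all (fun ch => PySem.Chars.isdigit ch || PySem.Chars.isspace ch || decide (ch ∈ ['.', ',', '+', '-']))
      , b || cs.any (fun ch => decide (ch.toNat < 9))
      , c || cs.any (fun ch => PySem.Chars.isalpha ch) ) := by
  induction cs generalizing a b c with
  | nil => simp
  | cons x xs ih =>
      simp only [List.foldl_cons, List.all_cons, List.any_cons, ih]
      simp [Bool.and_assoc, Bool.or_assoc]

-- ===== VERDICT (by name: the statement is the Claim_ definition above) =====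
theorem looks_like_prompt_string_py_spec : Claim_equal_looks_like_prompt_string_py := by
  intro value _
  unfold Spec_looks_like_prompt_string_py looks_like_prompt_string_py looks_like_prompt_string_py_alt
  simp only [pvIsNumericLikeText, pvHasControlChars, pvFoldFlags, Bool.true_and, Bool.false_or]
  by_cases h6 : (PySem.Chars.strip value.toList).length < 6
  · have he : (PySem.Chars.strip value.toList).isEmpty || decide ((PySem.Chars.strip value.toList).length < 6) = true := by
      simp [h6]
    simp [h6, he]
  · have hne : (PySem.Chars.strip value.toList).isEmpty = false := by
      rw [List.isEmpty_eq_false_iff]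
      intro h; exact h6 (by simp [h])
    simp only [hne, h6, decide_false, Bool.or_false, Bool.false_or, if_false]
    by_cases hctl : ((PySem.Chars.strip value.toList).any fun ch => decide (ch.toNat < 9)) = true <;>
      cases cs_all : (PySem.Chars.strip value.toList).all
          (fun ch => PySem.Chars.isdigit ch || PySem.Chars.isspace ch || decide (ch ∈ ['.', ',', '+', '-'])) <;>
        simp [cs_all, hctl]
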